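-- pv_equiv track=rewrite | github.com/ShishirAravindan/Freedman_Bank_adDataAnalysis | Scripts/createTokensFromAd.py | getSegmentIDs
-- ===== SOURCE A (Python) =====
-- def getSegmentIDs(marked_text:list[str]) -> list[int]:
--     """
--     Given a marked version of text return the segment IDs.
--     A segment corresponds to a sentence in the token.
--     Ex: token = "[CLS] a b [SEP] c [SEP] d [SEP]"
--     return: [0,0,0,0, 1, 1, 2, 2]
--     """
--     marked_text = ' '.join(marked_text)
--     segment_index = 0
--     segment_count = 0
--     segment_IDs = []
--     eos = False
--
--     for token in marked_text.split(' '):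
--         segment_count += 1
--         if token == "[SEP]": eos = True
--
--         if eos:
--             segment_IDs.extend([segment_index] * segment_count)
--             eos = not eos
--             segment_index += 1
--             segment_count = 0
--     return segment_IDs
-- ===== SOURCE B (Python) =====
-- def getSegmentIDs(marked_text: list[str]) -> list[int]:
--     tokens = ' '.join(marked_text).split(' ')
--     sep = [t == "[SEP]" for t in tokens]
--     if True not in sep:
--         return []
--     cut = len(sep) - sep[::-1].index(True)   # one past the last [SEP]
--     # the segment ID of token i is the number of [SEP] tokens strictly before it
--     return [sum(sep[:i]) for i in range(cut)]
-- ===== Notes on version B (the rewrite author's own statement) =====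
-- stated objective: alternative
-- what changed: A runs a stateful loop that, on each [SEP], emits the current segment index repeated segment_count times; B has no such emission loop: it locates the last [SEP] by a reverse search and maps every token position before that cut directly to its ID, defined as the number of [SEP] tokens strictly before that position (a prefix count).
import Mathlib
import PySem

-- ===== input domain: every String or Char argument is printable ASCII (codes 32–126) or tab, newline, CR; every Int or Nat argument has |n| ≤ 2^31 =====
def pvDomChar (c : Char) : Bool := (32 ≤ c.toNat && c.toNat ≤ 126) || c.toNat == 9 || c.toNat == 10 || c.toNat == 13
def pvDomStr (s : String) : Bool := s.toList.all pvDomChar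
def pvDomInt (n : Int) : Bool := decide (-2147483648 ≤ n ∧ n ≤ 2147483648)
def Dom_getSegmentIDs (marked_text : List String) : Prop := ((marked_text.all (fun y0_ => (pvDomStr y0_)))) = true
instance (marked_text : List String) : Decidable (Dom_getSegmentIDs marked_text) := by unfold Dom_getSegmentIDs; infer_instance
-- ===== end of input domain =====

-- B drops A's emit-on-[SEP] loop: it cuts one past the last [SEP] (reverse search) and maps each
-- remaining position to the prefix count of [SEP]s before it; objective: alternative algorithm.

-- ===== PORT A =====
-- one iteration of A's for-loop; state = (segment_index, segment_count, segment_IDs, eos)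
def pvStepA (st : Int × Int × List Int × Bool) (token : String) : Int × Int × List Int × Bool :=
  let segment_count := st.2.1 + 1
  let eos := if token == "[SEP]" then true else st.2.2.2
  if eos then
    (st.1 + 1, 0, st.2.2.1 ++ PySem.List.pyRepeat [st.1] segment_count, !eos)
  else
    (st.1, segment_count, st.2.2.1, eos)

def getSegmentIDs (marked_text : List String) : List Int :=
  let mt := PySem.Str.join " " marked_text
  (((PySem.Str.split? mt " ").getD []).foldl pvStepA (0, 0, [], false)).2.2.1

-- ===== PORT B =====
def getSegmentIDs_alt (marked_text : List String) : List Int :=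
  let tokens := (PySem.Str.split? (PySem.Str.join " " marked_text) " ").getD []
  let sep := tokens.map (fun t => t == "[SEP]")
  if !(sep.contains true) then []
  else
    -- cut = len(sep) - sep[::-1].index(True); the guard ensures .index succeeds
    let cut : Int := PySem.List.len sep
      - ((PySem.List.index? ((PySem.List.slice? sep none none (-1)).getD []) true).getD 0 : Int)
    (PySem.List.pyRange 0 cut 1).map (fun i =>
      ((PySem.List.slice sep none (some i)).map (fun b => if b then (1 : Int) else 0)).sum)

-- ===== PRECONDITION & SPEC =====
def Spec_getSegmentIDs (marked_text : List String) (out : List Int) : Prop := out = getSegmentIDs_alt marked_text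
instance (marked_text : List String) (out : List Int) : Decidable (Spec_getSegmentIDs marked_text out) := by unfold Spec_getSegmentIDs; infer_instance

-- ===== CLAIM (what is proved, stated in full; the proofs are below) =====
def Claim_equal_getSegmentIDs : Prop := ∀ (marked_text : List String), Dom_getSegmentIDs marked_text → Spec_getSegmentIDs marked_text (getSegmentIDs marked_text)

-- ===== LEMMAS AND PROOFS =====

-- reference recursion for A's loop (eos is consumed in the iteration that sets it)
def pvARun (idx : Int) (cnt : Nat) : List String → List Int
  | [] => []
  | t :: ts => if t == "[SEP]" then List.replicate (cnt + 1) idx ++ pvARun (idx + 1) 0 ts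
               else pvARun idx (cnt + 1) ts

-- one past the last [SEP]
def pvCut : List String → Nat
  | [] => 0
  | t :: ts => if "[SEP]" ∈ ts then 1 + pvCut ts else (if t == "[SEP]" then 1 else 0)

-- number of [SEP]s in a list, as Int
def pvPC (ts : List String) : Int := (ts.countP (fun t => t == "[SEP]") : Int)

theorem pvMemMap (ts : List String) : true ∈ ts.map (fun t => t == "[SEP]") ↔ "[SEP]" ∈ ts := by
  rw [List.mem_map]
  constructor
  · rintro ⟨x, hx, hfx⟩
    have hx' : x = "[SEP]" := by simpa [beq_iff_eq] using hfx.symm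
    rwa [hx'] at hx
  · intro hm
    exact ⟨"[SEP]", hm, by simp⟩

theorem pvA_fold (tokens : List String) : ∀ (idx : Int) (cnt : Nat) (ids : List Int),
    (tokens.foldl pvStepA (idx, (cnt : Int), ids, false)).2.2.1 = ids ++ pvARun idx cnt tokens := by
  induction tokens with
  | nil => intro idx cnt ids; simp [pvARun]
  | cons t ts ih =>
    intro idx cnt ids
    simp only [List.foldl_cons, pvStepA, pvARun]
    by_cases h : t == "[SEP]"
    · simp only [h, ite_true, Bool.not_true]
      have := ih (idx + 1) 0 (ids ++ PySem.List.pyRepeat [idx] ((cnt : Int) + 1))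
      simp only [Nat.cast_zero] at this
      rw [this]
      have hrep : PySem.List.pyRepeat [idx] ((cnt : Int) + 1) = List.replicate (cnt + 1) idx := by
        rw [PySem.List.pyRepeat_singleton]; norm_num
      rw [hrep, List.append_assoc]
    · simp only [h, Bool.false_eq_true, ite_false]
      have := ih idx (cnt + 1) ids
      simpa using this

theorem pvA_closed (tokens : List String) : ∀ (idx : Int) (cnt : Nat),
    pvARun idx cnt tokens =
      if "[SEP]" ∈ tokens then
        List.replicate cnt idx ++ (List.range (pvCut tokens)).map (fun i => idx + pvPC (tokens.take i))
      else [] := by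
  induction tokens with
  | nil => intro idx cnt; simp [pvARun]
  | cons t ts ih =>
    intro idx cnt
    by_cases hts : "[SEP]" ∈ ts
    · have hmem : "[SEP]" ∈ t :: ts := List.mem_cons_of_mem _ hts
      rw [show pvCut (t :: ts) = 1 + pvCut ts by simp [pvCut, hts]]
      rw [show (1 + pvCut ts) = pvCut ts + 1 by omega, List.range_succ_eq_map]
      by_cases h : t == "[SEP]"
      · simp only [pvARun, h, ite_true, hmem, ite_true, ih, hts, ite_true]
        simp only [List.map_cons, List.take_zero, List.map_map]
        have hpc0 : pvPC [] = 0 := by simp [pvPC]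
        have hstep : ∀ i : Nat, pvPC ((t :: ts).take (i + 1)) = 1 + pvPC (ts.take i) := by
          intro i; simp [pvPC, List.take_succ_cons, h]; omega
        rw [hpc0]
        have : (List.replicate cnt idx ++ (idx + 0) ::
            (List.range (pvCut ts)).map ((fun i => idx + pvPC ((t :: ts).take i)) ∘ Nat.succ))
            = List.replicate (cnt + 1) idx ++ (List.range (pvCut ts)).map (fun i => (idx + 1) + pvPC (ts.take i)) := by
          rw [List.replicate_succ' ]
          simp only [List.append_assoc, List.singleton_append, add_zero]
          congr 1
          congr 1
          apply List.map_congr_left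
          intro i _
          simp only [Function.comp_apply, Nat.succ_eq_add_one, hstep i]
          ring
        rw [this]
        simp
      · have hstep : ∀ i : Nat, pvPC ((t :: ts).take (i + 1)) = pvPC (ts.take i) := by
          intro i; simp [pvPC, List.take_succ_cons, h]
        simp only [pvARun, h, Bool.false_eq_true, ite_false, ih, hts, ite_true, hmem]
        simp only [List.map_cons, List.take_zero, List.map_map]
        rw [List.replicate_succ']
        simp only [List.append_assoc, List.singleton_append]
        congr 1
        congr 1
        · simp [pvPC]
        · apply List.map_congr_left
          intro i _
          simp only [Function.comp_apply, Nat.succ_eq_add_one, hstep i]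
    · by_cases h : t == "[SEP]"
      · have hmem : "[SEP]" ∈ t :: ts := by simp at h; simp [h]
        simp only [pvARun, h, ite_true, ih, hts, ite_false, hmem]
        rw [show pvCut (t :: ts) = 1 by simp [pvCut, hts, h]]
        simp [List.replicate_succ', pvPC]
      · have hmem : "[SEP]" ∉ t :: ts := by simp at h ⊢; exact ⟨fun e => h e.symm, hts⟩
        simp only [pvARun, h, Bool.false_eq_true, ite_false, ih, hts, ite_false, hmem]

theorem pvCut_index (tokens : List String) (h : "[SEP]" ∈ tokens) :
    (PySem.List.len (tokens.map (fun t => t == "[SEP]"))) -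
      ((PySem.List.index? (tokens.map (fun t => t == "[SEP]")).reverse true).getD 0 : Int)
      = (pvCut tokens : Int) := by
  induction tokens with
  | nil => cases h
  | cons t ts ih =>
    simp only [List.map_cons, List.reverse_cons]
    by_cases hts : "[SEP]" ∈ ts
    · have hmem : true ∈ (ts.map (fun t => t == "[SEP]")).reverse := by
        rw [List.mem_reverse]; exact (pvMemMap ts).mpr hts
      rw [PySem.List.index?_append_of_mem _ hmem]
      have := ih hts
      rw [PySem.List.len_eq] at this ⊢
      rw [show pvCut (t :: ts) = 1 + pvCut ts by simp [pvCut, hts]]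
      simp only [List.length_cons, List.length_map] at this ⊢
      push_cast at this ⊢
      omega
    · have ht : t = "[SEP]" := by rcases List.mem_cons.mp h with h1 | h2; exact h1.symm; exact absurd h2 hts
      have hne : true ∉ (ts.map (fun t => t == "[SEP]")).reverse := by
        rw [List.mem_reverse]; exact fun hm => hts ((pvMemMap ts).mp hm)
      have hbt : (t == "[SEP]") = true := by simp [ht]
      rw [hbt, PySem.List.index?_append_singleton_self _ true hne]
      rw [show pvCut (t :: ts) = 1 by simp [pvCut, hts, hbt]]
      rw [PySem.List.len_eq]
      simp

-- ===== VERDICT (by name: the statement is the Claim_ definition above) =====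
theorem getSegmentIDs_spec : Claim_equal_getSegmentIDs := by
  intro marked_text _
  unfold Spec_getSegmentIDs getSegmentIDs getSegmentIDs_alt
  dsimp only []
  generalize ((PySem.Str.split? (PySem.Str.join " " marked_text) " ").getD []) = tokens
  have hA := pvA_fold tokens 0 0 []
  simp only [Nat.cast_zero, List.nil_append] at hA
  rw [hA, pvA_closed tokens 0 0]
  by_cases hmem : "[SEP]" ∈ tokens
  · rw [if_pos hmem]
    rw [if_neg (by simpa using hmem)]
    rw [PySem.List.slice?_none_none_neg_one]
    simp only [Option.getD_some]
    rw [pvCut_index tokens hmem, PySem.List.pyRange_zero_natCast (pvCut tokens)]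
    simp only [List.replicate_zero, List.nil_append, List.map_map]
    apply List.map_congr_left
    intro k _
    simp only [Function.comp_apply]
    rw [PySem.List.slice_to_natCast, ← List.map_take, List.map_map]
    simp only [Function.comp_def, PySem.List.sum_map_ite_one_zero, pvPC]
    ring
  · rw [if_neg hmem, if_pos (by simpa using hmem)]
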